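-- pv_equiv track=rewrite | github.com/Gyeol0/TIL | Algorithm/List_practice/1860. 진기의 최고급 붕어빵2.py | Bread
-- ===== SOURCE A (Python) =====
-- def Bread(M, K, time):
--     # 정렬 없이 풀어보기
--     # 시간별로 만드는 붕어빵 최대 리스트
--     bread = [K] * (11111 // M + 1)
--     # 0 타임에는 없음
--     bread[0] = 0
--     for i in time:
--         # 가장 나중에(최근)에 만든 붕어빵을 준다.
--         for j in range(i//M, -1, -1):
--             if bread[j] > 0:
--                 bread[j] -= 1
--                 break
--             # 마지막까지 붕어빵이 없으면 불가능
--             if j == 0: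
--                 return 'Impossible'
--     return 'Possible'
-- ===== SOURCE B (Python) =====
-- def Bread(M, K, time):
--     # Hall-style feasibility check: batch j (ready at time j*M, batch 0 empty)
--     # yields max(K, 0) breads; bucket-count the customers by the last batch
--     # they can still eat (t // M), then scan batches in order and compare the
--     # cumulative demand with the cumulative supply max(K,0)*j.
--     batches = 11111 // M
--     per = max(K, 0)
--     demand = {}
--     for t in time:
--         c = t // M
--         demand[c] = demand.get(c, 0) + 1
--     waiting = 0
--     for j in range(batches + 1):
--         waiting += demand.get(j, 0)
--         if waiting > per * j:
--             return 'Impossible'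
--     return 'Possible'
-- ===== Notes on version B (the rewrite author's own statement) =====
-- stated objective: alternative
-- what changed: A simulates serving each customer with an inner backward scan over a mutable per-batch stock array; B never simulates: it bucket-counts customers by their last reachable batch t//M and checks Hall's feasibility condition (cumulative demand <= max(K,0)*j) in one scan over the batches.
-- outside the precondition, e.g. on Bread(1, 1, [0, 20000]): A returns 'Impossible', B returns 'Impossible'
import Mathlib
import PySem

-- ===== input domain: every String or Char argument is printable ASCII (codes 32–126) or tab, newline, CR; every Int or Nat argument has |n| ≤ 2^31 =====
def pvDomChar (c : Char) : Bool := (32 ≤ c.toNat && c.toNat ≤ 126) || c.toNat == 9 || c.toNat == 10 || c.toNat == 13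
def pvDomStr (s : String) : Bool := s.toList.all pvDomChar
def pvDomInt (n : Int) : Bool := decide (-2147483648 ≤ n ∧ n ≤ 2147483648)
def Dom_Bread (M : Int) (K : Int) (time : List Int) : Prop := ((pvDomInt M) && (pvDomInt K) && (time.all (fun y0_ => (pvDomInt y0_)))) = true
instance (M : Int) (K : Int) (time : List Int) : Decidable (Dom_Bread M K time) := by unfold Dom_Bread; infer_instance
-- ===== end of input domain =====

-- B replaces A's per-customer greedy simulation over a mutable stock array by a single
-- Hall-condition scan over bucket counts; equivalence of the RETURN value is proved on Pre_.

-- ===== PORT A =====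
-- inner loop 'for j in range(i//M, -1, -1)': structural countdown on j : Nat
-- (bread[j] is ported as getD; under Pre_ every scanned index is in range, so this is exact —
--  an out-of-range bread[j] is a Python IndexError and lies outside Pre_Bread).
def breadInnerA (b : List Int) : Nat → Option (List Int)
  | 0 => if b.getD 0 0 > 0 then some (b.set 0 (b.getD 0 0 - 1)) else none
  | j+1 => if b.getD (j+1) 0 > 0 then some (b.set (j+1) (b.getD (j+1) 0 - 1)) else breadInnerA b j

def breadLoopA (M : Int) (b : List Int) : List Int → String
  | [] => "Possible"
  | i :: rest =>
    let c := PySem.Int.floordiv i M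
    if c < 0 then breadLoopA M b rest        -- range(i//M, -1, -1) is empty
    else
      match breadInnerA b c.toNat with
      | some b' => breadLoopA M b' rest
      | none => "Impossible"

def Bread (M : Int) (K : Int) (time : List Int) : String :=
  -- bread = [K] * (11111 // M + 1); bread[0] = 0  (bread[0]=0 on an empty list raises: outside Pre_)
  let bread := (List.replicate (PySem.Int.floordiv 11111 M + 1).toNat K).set 0 0
  breadLoopA M bread time

-- ===== PORT B =====
def breadDemand (M : Int) (time : List Int) : PySem.Dict Int Int :=
  time.foldl (fun d t =>
    let c := PySem.Int.floordiv t M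
    d.insert c (d.getD c 0 + 1)) PySem.Dict.empty

def breadLoopB (per : Int) (d : PySem.Dict Int Int) : List Int → Int → String
  | [], _ => "Possible"
  | j :: rest, waiting =>
    let waiting' := waiting + d.getD j 0
    if waiting' > per * j then "Impossible" else breadLoopB per d rest waiting'

def Bread_alt (M : Int) (K : Int) (time : List Int) : String :=
  let batches := PySem.Int.floordiv 11111 M
  let per := max K 0
  breadLoopB per (breadDemand M time) (PySem.List.pyRange 0 (batches + 1) 1) 0

-- ===== PRECONDITION & SPEC =====
-- Pre_ excludes the inputs on which Python A raises: M ≥ 1 (M = 0 is a ZeroDivisionError, M < 0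
-- makes the bread list empty and bread[0] = 0 an IndexError) and every i//M within the fixed
-- table (otherwise bread[j] is an IndexError). Pre_ also excludes the few inputs where an
-- out-of-table i//M sits behind an earlier unservable customer, so A happens to return
-- 'Impossible' before reaching the IndexError; B returns the same value there.
def Pre_Bread (M : Int) (K : Int) (time : List Int) : Prop :=
  1 ≤ M ∧ ∀ t ∈ time, PySem.Int.floordiv t M ≤ PySem.Int.floordiv 11111 M
instance (M : Int) (K : Int) (time : List Int) : Decidable (Pre_Bread M K time) := by
  unfold Pre_Bread; infer_instance

def pvWitness_Bread : Int × Int × List Int := (5, 2, [5, 12])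

def Spec_Bread (M : Int) (K : Int) (time : List Int) (out : String) : Prop := out = Bread_alt M K time
instance (M : Int) (K : Int) (time : List Int) (out : String) : Decidable (Spec_Bread M K time out) := by
  unfold Spec_Bread; infer_instance

-- ===== CLAIM (what is proved, stated in full; the proofs are below) =====
def Claim_equal_Bread : Prop := ∀ (M : Int) (K : Int) (time : List Int), Dom_Bread M K time → Pre_Bread M K time → Spec_Bread M K time (Bread M K time)

-- ===== LEMMAS AND PROOFS =====

-- deadline of customer t: the last batch he can still eat
def bCdl (M t : Int) : Int := PySem.Int.floordiv t M

-- number of customers of `time` whose deadline lies in [0, u]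
def bCnt (M : Int) (time : List Int) (u : Int) : Int :=
  ((time.filter (fun t => decide (0 ≤ bCdl M t) && decide (bCdl M t ≤ u))).length : Int)

-- stock still reachable by a customer with deadline u (sum of cells 0..u)
def bAvail (b : List Int) (u : Nat) : Int := (b.take (u+1)).sum

-- the Hall-violation test both results are reduced to
def bFail (N : Nat) (f : Nat → Int) (g : Nat → Int) : Bool :=
  (List.range (N+1)).any (fun u => decide (f u < g u))

theorem bCnt_nonneg (M : Int) (time : List Int) (u : Int) : 0 ≤ bCnt M time u := by
  unfold bCnt; positivity

theorem bCnt_mono (M : Int) (time : List Int) {u v : Int} (h : u ≤ v) :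
    bCnt M time u ≤ bCnt M time v := by
  unfold bCnt
  have := List.countP_mono_left (l := time)
    (p := fun t => decide (0 ≤ bCdl M t) && decide (bCdl M t ≤ u))
    (q := fun t => decide (0 ≤ bCdl M t) && decide (bCdl M t ≤ v))
    (fun a _ ha => by simp only [Bool.and_eq_true, decide_eq_true_eq] at ha ⊢; omega)
  rw [← List.countP_eq_length_filter, ← List.countP_eq_length_filter]
  exact_mod_cast this

theorem bCnt_neg (M : Int) (time : List Int) (u : Int) (hu : u < 0) : bCnt M time u = 0 := by
  unfold bCnt
  rw [List.filter_eq_nil_iff.mpr]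
  · rfl
  · intro a _; simp only [Bool.and_eq_true, decide_eq_true_eq]; omega

theorem bCnt_cons (M t : Int) (rest : List Int) (u : Int) :
    bCnt M (t :: rest) u = bCnt M rest u + (if 0 ≤ bCdl M t ∧ bCdl M t ≤ u then 1 else 0) := by
  unfold bCnt
  rw [List.filter_cons]
  by_cases h : 0 ≤ bCdl M t ∧ bCdl M t ≤ u
  · rw [if_pos (by simp only [Bool.and_eq_true, decide_eq_true_eq]; exact h), if_pos h]
    simp only [List.length_cons]
    push_cast; ring
  · rw [if_neg (by simp only [Bool.and_eq_true, decide_eq_true_eq]; tauto), if_neg h]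
    ring

theorem sum_take_succ_getD (b : List Int) (u : Nat) :
    (b.take (u+1)).sum = (b.take u).sum + b.getD u 0 := by
  rw [List.take_add_one, List.sum_append]
  cases h : b[u]? <;> simp [List.getD_eq_getElem?_getD, h]

theorem getD_nonneg (b : List Int) (hb : ∀ x ∈ b, 0 ≤ x) (k : Nat) : 0 ≤ b.getD k 0 := by
  rw [List.getD_eq_getElem?_getD]
  cases h : b[k]? with
  | none => simp
  | some x => simpa using hb x (List.mem_of_getElem? h)

theorem getD_nonpos (b : List Int) (hb : ∀ x ∈ b, x ≤ 0) (k : Nat) : b.getD k 0 ≤ 0 := by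
  rw [List.getD_eq_getElem?_getD]
  cases h : b[k]? with
  | none => simp
  | some x => simpa using hb x (List.mem_of_getElem? h)

theorem getD_set_eq (l : List Int) (i u : Nat) (a d : Int) (h : i < l.length) :
    (l.set i a).getD u d = if u = i then a else l.getD u d := by
  simp only [List.getD_eq_getElem?_getD, List.getElem?_set]
  by_cases hiu : i = u
  · subst hiu; simp [h]
  · simp [hiu, Ne.symm hiu]

theorem getD_pos_lt_length (b : List Int) (j : Nat) (h : 0 < b.getD j 0) : j < b.length := by
  by_contra hlen
  rw [List.getD_eq_getElem?_getD, List.getElem?_eq_none (by omega)] at h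
  simp at h

theorem bAvail_nonneg (b : List Int) (hb : ∀ x ∈ b, 0 ≤ x) (u : Nat) : 0 ≤ bAvail b u := by
  exact List.sum_nonneg (fun x hx => hb x (List.mem_of_mem_take hx))

theorem bAvail_set (b : List Int) (j : Nat) (hj : j < b.length) (u : Nat) :
    bAvail (b.set j (b.getD j 0 - 1)) u = bAvail b u - (if j ≤ u then 1 else 0) := by
  induction u with
  | zero =>
    unfold bAvail
    rw [sum_take_succ_getD (b.set j (b.getD j 0 - 1)) 0, sum_take_succ_getD b 0]
    simp only [List.take_zero, List.sum_nil, zero_add]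
    rw [getD_set_eq b j 0 _ 0 hj]
    by_cases h0 : j = 0
    · subst h0; simp
    · rw [if_neg (by omega), if_neg (by omega)]; ring
  | succ u ih =>
    unfold bAvail at ih ⊢
    rw [sum_take_succ_getD (b.set j (b.getD j 0 - 1)) (u+1), sum_take_succ_getD b (u+1), ih,
        getD_set_eq b j (u+1) _ 0 hj]
    by_cases h1 : u + 1 = j
    · rw [if_pos h1, if_neg (by omega), if_pos (by omega)]
      subst h1; ring
    · rw [if_neg h1]
      by_cases h2 : j ≤ u
      · rw [if_pos h2, if_pos (by omega)]; ring
      · rw [if_neg h2, if_neg (by omega)]; ring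

theorem bAvail_eq_zero (b : List Int) (hb : ∀ x ∈ b, 0 ≤ x) (u : Nat)
    (h : ∀ k, k ≤ u → b.getD k 0 ≤ 0) : bAvail b u = 0 := by
  induction u with
  | zero =>
    unfold bAvail
    rw [sum_take_succ_getD b 0]
    simp only [List.take_zero, List.sum_nil, zero_add]
    have h1 := h 0 (le_refl 0)
    have h2 := getD_nonneg b hb 0
    omega
  | succ u ih =>
    unfold bAvail at ih ⊢
    rw [sum_take_succ_getD b (u+1), ih (fun k hk => h k (by omega))]
    have h1 := h (u+1) (le_refl _)
    have h2 := getD_nonneg b hb (u+1)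
    omega

theorem bAvail_gap (b : List Int) (hb : ∀ x ∈ b, 0 ≤ x) (j c : Nat)
    (hgap : ∀ k, j < k → k ≤ c → b.getD k 0 ≤ 0) :
    ∀ u, j ≤ u → u ≤ c → bAvail b u = bAvail b j := by
  intro u
  induction u with
  | zero =>
    intro hju _
    have : j = 0 := by omega
    subst this; rfl
  | succ u ih =>
    intro hju huc
    by_cases h : j = u + 1
    · subst h; rfl
    · have h1 := hgap (u+1) (by omega) huc
      have h2 := getD_nonneg b hb (u+1)
      unfold bAvail at ih ⊢
      rw [sum_take_succ_getD b (u+1), ih (by omega) (by omega)]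
      omega

theorem breadInnerA_none_iff (b : List Int) (c : Nat) :
    breadInnerA b c = none ↔ ∀ j, j ≤ c → b.getD j 0 ≤ 0 := by
  induction c with
  | zero =>
    simp only [breadInnerA]
    by_cases h : b.getD 0 0 > 0
    · rw [if_pos h]
      constructor
      · intro hc; exact (Option.some_ne_none _ hc).elim
      · intro hall; exact absurd (hall 0 (le_refl 0)) (by omega)
    · rw [if_neg h]
      constructor
      · intro _ j hj
        have : j = 0 := by omega
        subst this; omega
      · intro _; rfl
  | succ c ih =>
    simp only [breadInnerA]
    by_cases h : b.getD (c+1) 0 > 0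
    · rw [if_pos h]
      constructor
      · intro hc; exact (Option.some_ne_none _ hc).elim
      · intro hall; exact absurd (hall (c+1) (le_refl _)) (by omega)
    · rw [if_neg h, ih]
      constructor
      · intro hall j hj
        rcases Nat.lt_or_ge j (c+1) with h1 | h1
        · exact hall j (by omega)
        · have hj1 : j = c + 1 := by omega
          subst hj1; omega
      · intro hall j hj; exact hall j (by omega)

theorem breadInnerA_some (b : List Int) (c : Nat) : ∀ (b' : List Int),
    breadInnerA b c = some b' →
    ∃ j, j ≤ c ∧ 0 < b.getD j 0 ∧ (∀ k, j < k → k ≤ c → b.getD k 0 ≤ 0) ∧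
      b' = b.set j (b.getD j 0 - 1) := by
  induction c with
  | zero =>
    intro b' h
    simp only [breadInnerA] at h
    by_cases hp : b.getD 0 0 > 0
    · rw [if_pos hp] at h
      exact ⟨0, le_refl 0, hp, fun k hk1 hk2 => by omega, (Option.some.inj h).symm⟩
    · rw [if_neg hp] at h
      exact absurd h.symm (Option.some_ne_none _)
  | succ c ih =>
    intro b' h
    simp only [breadInnerA] at h
    by_cases hp : b.getD (c+1) 0 > 0
    · rw [if_pos hp] at h
      exact ⟨c+1, le_refl _, hp, fun k hk1 hk2 => by omega, (Option.some.inj h).symm⟩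
    · rw [if_neg hp] at h
      obtain ⟨j, hj, hjp, hgap, hb'⟩ := ih b' h
      refine ⟨j, by omega, hjp, fun k hk1 hk2 => ?_, hb'⟩
      rcases Nat.lt_or_ge k (c+1) with h1 | h1
      · exact hgap k hk1 (by omega)
      · have : k = c + 1 := by omega
        subst this; omega

theorem bFail_congr (N : Nat) (f f' g g' : Nat → Int)
    (hf : ∀ u, u ≤ N → f u = f' u) (hg : ∀ u, u ≤ N → g u = g' u) :
    bFail N f g = bFail N f' g' := by
  rw [Bool.eq_iff_iff]
  unfold bFail
  simp only [List.any_eq_true, List.mem_range, decide_eq_true_eq]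
  constructor
  · rintro ⟨u, hu, hx⟩
    refine ⟨u, hu, ?_⟩
    rw [← hf u (by omega), ← hg u (by omega)]
    exact hx
  · rintro ⟨u, hu, hx⟩
    refine ⟨u, hu, ?_⟩
    rw [hf u (by omega), hg u (by omega)]
    exact hx

theorem hall_step (b : List Int) (hb : ∀ x ∈ b, 0 ≤ x) (N j c : Nat)
    (hj : j ≤ c) (hc : c ≤ N) (hjlen : j < b.length)
    (hgap : ∀ k, j < k → k ≤ c → b.getD k 0 ≤ 0)
    (R : Nat → Int) (hmono : ∀ u v : Nat, u ≤ v → R u ≤ R v) :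
    bFail N (fun u => bAvail (b.set j (b.getD j 0 - 1)) u) R =
    bFail N (fun u => bAvail b u) (fun u => R u + (if c ≤ u then 1 else 0)) := by
  rw [Bool.eq_iff_iff]
  unfold bFail
  simp only [List.any_eq_true, List.mem_range, decide_eq_true_eq]
  constructor
  · rintro ⟨u, hu, hlt⟩
    rw [bAvail_set b j hjlen u] at hlt
    by_cases hcu : c ≤ u
    · have hju : j ≤ u := by omega
      refine ⟨u, hu, ?_⟩
      simp only [hju, if_true] at hlt
      simp only [hcu, if_true]
      omega
    · by_cases hju : j ≤ u
      · have h1 : bAvail b u = bAvail b j := bAvail_gap b hb j c hgap u hju (by omega)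
        have h2 : bAvail b c = bAvail b j := bAvail_gap b hb j c hgap c hj (le_refl c)
        have h3 : R u ≤ R c := hmono u c (by omega)
        refine ⟨c, by omega, ?_⟩
        simp only [le_refl, if_true]
        simp only [hju, if_true] at hlt
        omega
      · refine ⟨u, hu, ?_⟩
        simp only [hju, if_false] at hlt
        simp only [hcu, if_false]
        omega
  · rintro ⟨u, hu, hlt⟩
    refine ⟨u, hu, ?_⟩
    rw [bAvail_set b j hjlen u]
    by_cases hcu : c ≤ u
    · have hju : j ≤ u := by omega
      simp only [hcu, if_true] at hlt
      simp only [hju, if_true]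
      omega
    · simp only [hcu, if_false] at hlt
      split <;> omega

theorem breadLoopA_eq (M : Int) (N : Nat) (time : List Int) : ∀ (b : List Int),
    b.length = N + 1 → (∀ x ∈ b, 0 ≤ x) → (∀ t ∈ time, bCdl M t ≤ (N : Int)) →
    breadLoopA M b time =
      if bFail N (fun u => bAvail b u) (fun u => bCnt M time u) then "Impossible" else "Possible" := by
  induction time with
  | nil =>
    intro b hlen hb _
    have hfail : bFail N (fun u => bAvail b u) (fun u => bCnt M ([] : List Int) u) = false := by
      unfold bFail bCnt
      simp only [List.filter_nil, List.length_nil, Int.natCast_zero, List.any_eq_false,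
        List.mem_range]
      intro u _
      exact fun hcon => absurd (of_decide_eq_true hcon) (not_lt.mpr (bAvail_nonneg b hb u))
    rw [hfail]; rfl
  | cons t rest ih =>
    intro b hlen hb hcdl
    have hcdlt : bCdl M t ≤ (N : Int) := hcdl t (List.mem_cons_self)
    have hcdlr : ∀ s ∈ rest, bCdl M s ≤ (N : Int) := fun s hs => hcdl s (List.mem_cons_of_mem t hs)
    show (if PySem.Int.floordiv t M < 0 then breadLoopA M b rest
      else match breadInnerA b (PySem.Int.floordiv t M).toNat with
        | some b' => breadLoopA M b' rest
        | none => "Impossible") = _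
    by_cases hneg : PySem.Int.floordiv t M < 0
    · rw [if_pos hneg, ih b hlen hb hcdlr]
      have : bFail N (fun u => bAvail b u) (fun u => bCnt M rest u)
           = bFail N (fun u => bAvail b u) (fun u => bCnt M (t :: rest) u) := by
        apply bFail_congr _ _ _ _ _ (fun u _ => rfl)
        intro u _
        rw [bCnt_cons]
        have : ¬ (0 ≤ bCdl M t ∧ bCdl M t ≤ (u : Int)) := by unfold bCdl; omega
        simp [this]
      rw [← this]
    · rw [if_neg hneg]
      have hc0 : (0:Int) ≤ PySem.Int.floordiv t M := by omega
      set c : Nat := (PySem.Int.floordiv t M).toNat with hcdef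
      have hcdlt' : PySem.Int.floordiv t M ≤ (N : Int) := hcdlt
      have hcast : ((c : Nat) : Int) = PySem.Int.floordiv t M := Int.toNat_of_nonneg hc0
      have hcN : c ≤ N := by omega
      cases hinner : breadInnerA b c with
      | none =>
        have hall := (breadInnerA_none_iff b c).mp hinner
        have hz : bAvail b c = 0 := bAvail_eq_zero b hb c (fun k hk => hall k hk)
        have : bFail N (fun u => bAvail b u) (fun u => bCnt M (t :: rest) u) = true := by
          unfold bFail
          simp only [List.any_eq_true, List.mem_range, decide_eq_true_eq]
          refine ⟨c, by omega, ?_⟩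
          rw [hz, bCnt_cons]
          have hcc : 0 ≤ bCdl M t ∧ bCdl M t ≤ ((c:Nat) : Int) := by
            unfold bCdl; omega
          rw [if_pos hcc]
          have := bCnt_nonneg M rest ((c:Nat) : Int)
          omega
        rw [this]; rfl
      | some b' =>
        obtain ⟨j, hjc, hjp, hgap, hb'⟩ := breadInnerA_some b c b' hinner
        have hjlen : j < b.length := getD_pos_lt_length b j hjp
        have hb'nn : ∀ x ∈ b', 0 ≤ x := by
          intro x hx
          rw [hb'] at hx
          rcases List.mem_or_eq_of_mem_set hx with h | h
          · exact hb x h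
          · subst h; omega
        have hb'len : b'.length = N + 1 := by rw [hb', List.length_set]; exact hlen
        show breadLoopA M b' rest = _
        rw [ih b' hb'len hb'nn hcdlr, hb']
        have step := hall_step b hb N j c hjc hcN hjlen hgap
          (fun u => bCnt M rest u) (fun u v huv => bCnt_mono M rest (by exact_mod_cast huv))
        rw [step]
        show (if bFail N (fun u => bAvail b u)
            (fun u => bCnt M rest u + (if c ≤ u then 1 else 0)) = true
          then "Impossible" else "Possible") = _
        have : bFail N (fun u => bAvail b u) (fun u => bCnt M rest u + (if c ≤ u then 1 else 0))
             = bFail N (fun u => bAvail b u) (fun u => bCnt M (t :: rest) u) := by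
          apply bFail_congr _ _ _ _ _ (fun u _ => rfl)
          intro u _
          rw [bCnt_cons]
          by_cases hcu : c ≤ u
          · rw [if_pos hcu, if_pos (show 0 ≤ bCdl M t ∧ bCdl M t ≤ (u:Int) by unfold bCdl; omega)]
          · rw [if_neg hcu, if_neg (show ¬(0 ≤ bCdl M t ∧ bCdl M t ≤ (u:Int)) by unfold bCdl; omega)]
        rw [this]
theorem breadLoopA_nonpos (M : Int) (time : List Int) : ∀ (b : List Int), (∀ x ∈ b, x ≤ 0) →
    breadLoopA M b time =
      if time.any (fun t => decide (0 ≤ bCdl M t)) then "Impossible" else "Possible" := by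
  induction time with
  | nil => intro b _; rfl
  | cons t rest ih =>
    intro b hb
    show (if PySem.Int.floordiv t M < 0 then breadLoopA M b rest
      else match breadInnerA b (PySem.Int.floordiv t M).toNat with
        | some b' => breadLoopA M b' rest
        | none => "Impossible") = _
    by_cases hneg : PySem.Int.floordiv t M < 0
    · rw [if_pos hneg, ih b hb]
      have : decide (0 ≤ bCdl M t) = false := by
        simp only [decide_eq_false_iff_not]; unfold bCdl; omega
      simp [this]
    · rw [if_neg hneg]
      have hnone : breadInnerA b (PySem.Int.floordiv t M).toNat = none :=
        (breadInnerA_none_iff b _).mpr (fun k _ => getD_nonpos b hb k)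
      rw [hnone]
      have : decide (0 ≤ bCdl M t) = true := by
        simp only [decide_eq_true_eq]; unfold bCdl; omega
      simp [this]

theorem breadDemand_getD (M : Int) (time : List Int) (j : Int) :
    (breadDemand M time).getD j 0 = ((time.map (bCdl M)).count j : Int) := by
  unfold breadDemand
  rw [show (List.foldl (fun (d : PySem.Dict Int Int) t =>
        let c := PySem.Int.floordiv t M
        d.insert c (d.getD c 0 + 1)) PySem.Dict.empty time)
      = (List.foldl (fun (d : PySem.Dict Int Int) x => d.insert x (d.getD x 0 + 1))
          PySem.Dict.empty (time.map (bCdl M))) from by rw [List.foldl_map]; rfl]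
  rw [PySem.Dict.getD_foldl_insert_add_one]
  simp

theorem count_map_cdl (M : Int) (time : List Int) (a : Int) (ha : 0 ≤ a) :
    ((time.map (bCdl M)).count a : Int) = bCnt M time a - bCnt M time (a - 1) := by
  induction time with
  | nil => unfold bCnt; simp
  | cons t rest ih =>
    rw [List.map_cons, List.count_cons, bCnt_cons, bCnt_cons]
    simp only [beq_iff_eq]
    push_cast
    rw [ih]
    split_ifs <;> omega

theorem breadLoopB_go (M per : Int) (time : List Int) :
    ∀ (n : Nat) (a waiting : Int), 0 ≤ a → waiting = bCnt M time (a - 1) →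
    breadLoopB per (breadDemand M time) (PySem.List.pyRange a (a + n) 1) waiting =
      if (List.range n).any (fun k => decide (per * (a + k) < bCnt M time (a + k)))
      then "Impossible" else "Possible" := by
  intro n
  induction n with
  | zero =>
    intro a waiting _ _
    rw [PySem.List.pyRange_one_eq_nil (by omega)]
    rfl
  | succ n ih =>
    intro a waiting ha hw
    rw [PySem.List.pyRange_one_cons (by omega)]
    show (if waiting + (breadDemand M time).getD a 0 > per * a then "Impossible"
      else breadLoopB per (breadDemand M time) (PySem.List.pyRange (a+1) (a + (n+1)) 1)
        (waiting + (breadDemand M time).getD a 0)) = _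
    have hwa : waiting + (breadDemand M time).getD a 0 = bCnt M time a := by
      rw [hw, breadDemand_getD, count_map_cdl M time a ha]
      ring
    rw [List.range_succ_eq_map]
    rw [List.any_cons]
    by_cases hfail : per * a < bCnt M time a
    · rw [if_pos (by rw [hwa]; omega)]
      simp only [List.any_map]
      have : decide (per * (a + ((0:Nat) : Int)) < bCnt M time (a + ((0:Nat) : Int))) = true := by
        simp only [decide_eq_true_eq]; push_cast; simpa using hfail
      rw [this]
      simp
    · rw [if_neg (by rw [hwa]; omega)]
      have harr : a + ((n:Int) + 1) = (a + 1) + (n : Int) := by ring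
      rw [harr, ih (a+1) _ (by omega) (by rw [hwa]; norm_num)]
      have hhead : decide (per * (a + ((0:Nat) : Int)) < bCnt M time (a + ((0:Nat) : Int))) = false := by
        simp only [decide_eq_false_iff_not]; push_cast; simpa using hfail
      rw [hhead]
      simp only [Bool.false_or, List.any_map]
      congr 1
      congr 1
      congr 1
      funext k
      simp only [Function.comp_apply, Nat.succ_eq_add_one]
      push_cast
      ring_nf

theorem Bread_alt_eq (M K : Int) (time : List Int) (hM : 1 ≤ M) :
    Bread_alt M K time =
      if bFail (PySem.Int.floordiv 11111 M).toNat (fun u => max K 0 * u)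
          (fun u => bCnt M time u) then "Impossible" else "Possible" := by
  have hL : 0 ≤ PySem.Int.floordiv 11111 M := by
    rw [PySem.Int.floordiv_eq_ediv_of_pos (by omega)]
    exact Int.ediv_nonneg (by norm_num) (by omega)
  set L := PySem.Int.floordiv 11111 M with hLdef
  have hcast : ((L.toNat + 1 : Nat) : Int) = L + 1 := by omega
  unfold Bread_alt
  show breadLoopB (max K 0) (breadDemand M time) (PySem.List.pyRange 0 (L + 1) 1) 0 = _
  rw [show (L + 1) = 0 + ((L.toNat + 1 : Nat) : Int) from by omega]
  rw [breadLoopB_go M (max K 0) time (L.toNat + 1) 0 0 (le_refl 0)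
    (by rw [bCnt_neg _ _ _ (by norm_num)])]
  unfold bFail
  simp only [zero_add]

-- ===== VERDICT (by name: the statement is the Claim_ definition above) =====
theorem Bread_spec : Claim_equal_Bread := by
  intro M K time _ hpre
  obtain ⟨hM, htime⟩ := hpre
  unfold Spec_Bread
  have hL : 0 ≤ PySem.Int.floordiv 11111 M := by
    rw [PySem.Int.floordiv_eq_ediv_of_pos (by omega)]
    exact Int.ediv_nonneg (by norm_num) (by omega)
  set L := PySem.Int.floordiv 11111 M with hLdef
  set N := L.toNat with hNdef
  have hNL : ((N : Nat) : Int) = L := Int.toNat_of_nonneg hL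
  rw [Bread_alt_eq M K time hM]
  unfold Bread
  rw [← hLdef, ← hNdef]
  have hrep : (List.replicate (L + 1).toNat K).set 0 0 = 0 :: List.replicate N K := by
    have : (L + 1).toNat = N + 1 := by omega
    rw [this, List.replicate_succ, List.set_cons_zero]
  rw [hrep]
  have hcdl : ∀ t ∈ time, bCdl M t ≤ (N : Int) := by
    intro t ht
    unfold bCdl
    rw [hNL]
    exact htime t ht
  by_cases hK : 0 ≤ K
  · rw [breadLoopA_eq M N time (0 :: List.replicate N K)
      (by simp)
      (by intro x hx
          rcases List.mem_cons.mp hx with h | h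
          · omega
          · rw [List.eq_of_mem_replicate h]; omega) hcdl]
    have : bFail N (fun u => bAvail (0 :: List.replicate N K) u) (fun u => bCnt M time u)
         = bFail N (fun u => max K 0 * u) (fun u => bCnt M time u) := by
      refine bFail_congr _ _ _ _ _ ?_ (fun u _ => rfl)
      intro u hu
      unfold bAvail
      rw [List.take_succ_cons, List.sum_cons, List.take_replicate, List.sum_replicate]
      rw [min_eq_left hu]
      rw [max_eq_left hK]
      push_cast [nsmul_eq_mul]
      ring
    rw [this]
  · rw [breadLoopA_nonpos M time (0 :: List.replicate N K)
      (by intro x hx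
          rcases List.mem_cons.mp hx with h | h
          · omega
          · rw [List.eq_of_mem_replicate h]; omega)]
    have hmax : max K 0 = 0 := by omega
    have hbool : (time.any (fun t => decide (0 ≤ bCdl M t)))
        = bFail N (fun u => max K 0 * u) (fun u => bCnt M time u) := by
      rw [Bool.eq_iff_iff]
      unfold bFail
      simp only [List.any_eq_true, List.mem_range, decide_eq_true_eq, hmax, zero_mul]
      constructor
      · rintro ⟨t, ht, hct⟩
        refine ⟨N, by omega, ?_⟩
        have h1 : bCnt M time ((N:Nat) : Int) ≥ 1 := by
          unfold bCnt
          have hmem : t ∈ time.filter (fun t => decide (0 ≤ bCdl M t) && decide (bCdl M t ≤ ((N:Nat):Int))) := by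
            rw [List.mem_filter]
            refine ⟨ht, ?_⟩
            simp only [Bool.and_eq_true, decide_eq_true_eq]
            exact ⟨hct, by rw [hNL]; unfold bCdl; exact htime t ht⟩
          have := List.length_pos_of_mem hmem
          omega
        omega
      · rintro ⟨u, _, hu⟩
        have hlen0 : (time.filter (fun t => decide (0 ≤ bCdl M t) && decide (bCdl M t ≤ ((u:Nat):Int)))).length > 0 := by
          unfold bCnt at hu
          omega
        obtain ⟨t, ht⟩ := List.exists_mem_of_length_pos hlen0
        rw [List.mem_filter] at ht
        refine ⟨t, ht.1, ?_⟩
        simp only [Bool.and_eq_true, decide_eq_true_eq] at ht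
        exact ht.2.1
    rw [hbool]
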